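-- pv_equiv track=rewrite | github.com/rjherrera/IIC1103 | G1/modulo_14632152.py | domingos
-- ===== SOURCE A (Python) =====
-- def diasmes(n, año):
--     b = False
--     if año % 4 == 0 and (año % 100 != 0 or año % 400 == 0):
--         b = True
--     if (n < 8 and n % 2 != 0) or (n > 7 and n % 2 == 0):
--         dias = 31
--     elif n == 2 and b:
--         dias = 29
--     elif n == 2 and not b:
--         dias = 28
--     else:
--         dias = 30
--     return dias
--
-- def domingos(hasta):
--     i = 0
--     y = 1901
--     domingos = 1
--     dia = 0
--     while y <= hasta:
--         i = 1
--         while i < 13: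
--             dia += diasmes(i, y)
--             if dia % 7 == 0:
--                 domingos += 1
--             i += 1
--         y += 1
--     return domingos
-- ===== SOURCE B (Python) =====
-- # Faster exact re-implementation: the Gregorian calendar repeats every 400 years
-- # (146097 days, a multiple of 7), so precompute the per-year month-end-hit counts
-- # for one 400-year cycle starting at 1901 and answer with quotient*cycle-sum plus
-- # a prefix sum of the remainder, instead of looping over every year up to `hasta`.
--
-- _MONTH_LEN = [31, 28, 31, 30, 31, 30, 31, 31, 30, 31, 30, 31]
--
-- def _mes(m, y):
--     if m == 2 and (y % 4 == 0 and (y % 100 != 0 or y % 400 == 0)):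
--         return 29
--     return _MONTH_LEN[m - 1]
--
-- def domingos(hasta):
--     counts = []
--     dia = 0
--     for k in range(400):
--         y = 1901 + k
--         c = 0
--         for m in range(1, 13):
--             dia += _mes(m, y)
--             if dia % 7 == 0:
--                 c += 1
--         counts.append(c)
--     n = hasta - 1900
--     if n <= 0:
--         return 1
--     q, r = divmod(n, 400)
--     return 1 + q * sum(counts) + sum(counts[:r])
-- ===== Notes on version B (the rewrite author's own statement) =====
-- stated objective: faster
-- what changed: A loops over every year from 1901 up to hasta; B precomputes the month-end-hit counts of one 400-year Gregorian cycle (146097 days, a multiple of 7, so the weekday pattern repeats) and answers with quotient * cycle-sum plus a prefix sum of the remainder, in O(1) work beyond the fixed 400-year table.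
import Mathlib
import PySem

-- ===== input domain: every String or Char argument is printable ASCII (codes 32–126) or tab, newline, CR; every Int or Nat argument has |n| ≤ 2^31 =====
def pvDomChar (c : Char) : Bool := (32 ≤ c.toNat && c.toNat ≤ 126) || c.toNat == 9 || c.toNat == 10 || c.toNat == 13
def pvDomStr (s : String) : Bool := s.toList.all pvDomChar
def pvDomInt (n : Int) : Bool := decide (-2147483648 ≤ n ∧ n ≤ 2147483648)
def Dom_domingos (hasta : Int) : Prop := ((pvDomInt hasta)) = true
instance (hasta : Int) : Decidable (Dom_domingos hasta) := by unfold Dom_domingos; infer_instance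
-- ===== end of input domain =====

-- B replaces A's year-by-year loop up to `hasta` by a fixed 400-year Gregorian-cycle
-- table (the calendar repeats every 146097 days, a multiple of 7): quotient × cycle
-- sum + a prefix sum for the remainder.

-- ===== PORT A =====
def diasmes (n año : Int) : Int :=
  let b : Bool := año % 4 == 0 && (año % 100 != 0 || año % 400 == 0)
  if (n < 8 && n % 2 != 0) || (n > 7 && n % 2 == 0) then 31
  else if n == 2 && b then 29
  else if n == 2 && !b then 28
  else 30

-- one pass of A's inner `while i < 13` month loop; state = (dia, domingos)
def aMonth (y : Int) (s : Int × Int) (i : Int) : Int × Int :=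
  let dia := s.1 + diasmes i y
  (dia, if dia % 7 == 0 then s.2 + 1 else s.2)

-- A's outer `while y <= hasta` loop, fuel = number of remaining years
def aLoop : Nat → Int → Int × Int → Int × Int
  | 0, _, s => s
  | n + 1, y, s => aLoop n (y + 1) ((PySem.List.pyRange 1 13 1).foldl (aMonth y) s)

def domingos (hasta : Int) : Int :=
  (aLoop (hasta - 1900).toNat 1901 (0, 1)).2

-- ===== PORT B =====
def bMonthLen : List Int := [31, 28, 31, 30, 31, 30, 31, 31, 30, 31, 30, 31]

def bMes (m y : Int) : Int :=
  if m == 2 && (y % 4 == 0 && (y % 100 != 0 || y % 400 == 0)) then 29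
  else (PySem.List.pyGet? bMonthLen (m - 1)).getD 0

-- one pass of B's inner `for m in range(1, 13)` loop; state = (dia, c)
def bMonth (y : Int) (t : Int × Int) (m : Int) : Int × Int :=
  let d := t.1 + bMes m y
  (d, if d % 7 == 0 then t.2 + 1 else t.2)

-- one pass of B's `for k in range(400)` table-building loop; state = (dia, counts)
def bYearStep (s : Int × List Int) (k : Nat) : Int × List Int :=
  let y : Int := 1901 + (k : Int)
  let inner := (PySem.List.pyRange 1 13 1).foldl (bMonth y) (s.1, 0)
  (inner.1, s.2 ++ [inner.2])

def bCounts : List Int := ((List.range 400).foldl bYearStep (0, [])).2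

def domingos_alt (hasta : Int) : Int :=
  let counts := bCounts
  let n := hasta - 1900
  if n ≤ 0 then 1
  else
    let q := PySem.Int.floordiv n 400
    let r := PySem.Int.mod n 400
    1 + q * counts.sum + (PySem.List.slice counts none (some r)).sum

-- ===== PRECONDITION & SPEC =====
def Spec_domingos (hasta : Int) (out : Int) : Prop := out = domingos_alt hasta
instance (hasta : Int) (out : Int) : Decidable (Spec_domingos hasta out) := by unfold Spec_domingos; infer_instance

-- ===== CLAIM (what is proved, stated in full; the proofs are below) =====
def Claim_equal_domingos : Prop := ∀ (hasta : Int), Dom_domingos hasta → Spec_domingos hasta (domingos hasta)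

-- ===== LEMMAS AND PROOFS =====

lemma pyR : PySem.List.pyRange 1 13 1 = [1,2,3,4,5,6,7,8,9,10,11,12] := by decide

-- A's month lengths agree with B's on the twelve months actually used
lemma diasmes_eq_bMes : ∀ m ∈ PySem.List.pyRange 1 13 1, ∀ y, diasmes m y = bMes m y := by
  rw [pyR]
  intro m hm y
  fin_cases hm <;>
    simp [diasmes, bMes, bMonthLen, PySem.List.pyGet?, PySem.List.pyIdx?]
  split_ifs <;> tauto

-- the canonical year step used in all the arithmetic below (B's inner fold)
def Y (y : Int) (s : Int × Int) : Int × Int :=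
  (PySem.List.pyRange 1 13 1).foldl (bMonth y) s

def cLoop : Nat → Int → Int × Int → Int × Int
  | 0, _, s => s
  | n + 1, y, s => cLoop n (y + 1) (Y y s)

lemma aLoop_eq_cLoop (n : Nat) : ∀ y s, aLoop n y s = cLoop n y s := by
  induction n with
  | zero => intro y s; rfl
  | succ k ih =>
    intro y s
    show aLoop k (y+1) _ = cLoop k (y+1) (Y y s)
    rw [ih]
    congr 1
    apply PySem.List.foldl_congr_mem
    intro acc x hx
    simp only [aMonth, bMonth, diasmes_eq_bMes x hx y]

-- the count accumulator is additive
lemma foldl_bMonth_acc (l : List Int) (y : Int) : ∀ d a,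
    l.foldl (bMonth y) (d, a) =
      ((l.foldl (bMonth y) (d, 0)).1, a + (l.foldl (bMonth y) (d, 0)).2) := by
  induction l with
  | nil => intro d a; simp
  | cons m t ih =>
    intro d a
    simp only [List.foldl_cons, bMonth]
    rw [ih]
    conv_rhs => rw [ih]
    split_ifs <;> simp only [Prod.mk.injEq] <;> exact ⟨trivial, by ring⟩

lemma Y_acc (y d a : Int) : Y y (d, a) = ((Y y (d, 0)).1, a + (Y y (d, 0)).2) :=
  foldl_bMonth_acc _ y d a

lemma cLoop_acc (n : Nat) : ∀ y d a,
    cLoop n y (d, a) = ((cLoop n y (d, 0)).1, a + (cLoop n y (d, 0)).2) := by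
  induction n with
  | zero => intro y d a; simp [cLoop]
  | succ k ih =>
    intro y d a
    have hL : cLoop (k+1) y (d, a) = cLoop k (y+1) (Y y (d, a)) := rfl
    have hR : cLoop (k+1) y (d, 0) = cLoop k (y+1) (Y y (d, 0)) := rfl
    rw [hL, hR, Y_acc y d a]
    rw [ih (y+1) (Y y (d,0)).1 (a + (Y y (d,0)).2)]
    conv_rhs => rw [show Y y (d,0) = ((Y y (d,0)).1, (Y y (d,0)).2) from rfl,
                    ih (y+1) (Y y (d,0)).1 (Y y (d,0)).2]
    simp only [Prod.mk.injEq]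
    exact ⟨trivial, by ring⟩

-- shifting the year by 400·j and the running day by 7·k changes nothing observable
lemma bMes_shift (m y j : Int) : bMes m (y + 400 * j) = bMes m y := by
  have h4 : (y + 400 * j) % 4 = y % 4 := by omega
  have h100 : (y + 400 * j) % 100 = y % 100 := by omega
  have h400 : (y + 400 * j) % 400 = y % 400 := by omega
  simp only [bMes, h4, h100, h400]

lemma foldl_bMonth_shift (l : List Int) (y j k : Int) : ∀ d a,
    l.foldl (bMonth (y + 400 * j)) (d + 7 * k, a) =
      ((l.foldl (bMonth y) (d, a)).1 + 7 * k, (l.foldl (bMonth y) (d, a)).2) := by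
  induction l with
  | nil => intro d a; simp
  | cons m t ih =>
    intro d a
    simp only [List.foldl_cons, bMonth, bMes_shift]
    have e1 : d + 7 * k + bMes m y = (d + bMes m y) + 7 * k := by ring
    have e2 : ((d + bMes m y) + 7 * k) % 7 = (d + bMes m y) % 7 := by omega
    rw [e1, e2]
    exact ih _ _

lemma Y_shift (y j k d a : Int) :
    Y (y + 400 * j) (d + 7 * k, a) = ((Y y (d, a)).1 + 7 * k, (Y y (d, a)).2) :=
  foldl_bMonth_shift _ y j k d a

lemma cLoop_shift (n : Nat) : ∀ y d a j k,
    cLoop n (y + 400 * j) (d + 7 * k, a) =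
      ((cLoop n y (d, a)).1 + 7 * k, (cLoop n y (d, a)).2) := by
  induction n with
  | zero => intro y d a j k; simp [cLoop]
  | succ t ih =>
    intro y d a j k
    show cLoop t (y + 400 * j + 1) (Y (y + 400 * j) (d + 7 * k, a)) = _
    rw [Y_shift]
    have e : y + 400 * j + 1 = (y + 1) + 400 * j := by ring
    rw [e]
    have := ih (y + 1) (Y y (d, a)).1 (Y y (d, a)).2 j k
    simpa using this

lemma cLoop_add (a : Nat) : ∀ b y s, cLoop (a + b) y s = cLoop b (y + a) (cLoop a y s) := by
  induction a with
  | zero => intro b y s; simp [cLoop]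
  | succ t ih =>
    intro b y s
    have e : t + 1 + b = t + b + 1 := by omega
    rw [e]
    show cLoop (t + b) (y + 1) (Y y s) = _
    rw [ih b (y + 1) (Y y s)]
    have e2 : y + 1 + (t : Int) = y + ((t : Int) + 1) := by ring
    rw [e2]
    rfl

lemma cLoop_succ_back (n : Nat) : ∀ y s, cLoop (n + 1) y s = Y (y + n) (cLoop n y s) := by
  induction n with
  | zero => intro y s; simp [cLoop]
  | succ t ih =>
    intro y s
    show cLoop (t + 1) (y + 1) (Y y s) = _
    rw [ih (y + 1) (Y y s)]
    have e : y + 1 + (t : Int) = y + ((t : Int) + 1) := by ring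
    rw [e]
    rfl

def Dcyc : Int := (cLoop 400 1901 (0, 0)).1
def Ccyc : Int := (cLoop 400 1901 (0, 0)).2

-- the 400-year cycle, evaluated in four 100-year chunks (a single 400-deep
-- kernel evaluation overflows the stack)
set_option maxRecDepth 8000 in
lemma cyc100a : cLoop 100 1901 (0, 0) = (36525, 170) := by decide
set_option maxRecDepth 8000 in
lemma cyc100b : cLoop 100 2001 (36525, 170) = (73049, 342) := by decide
set_option maxRecDepth 8000 in
lemma cyc100c : cLoop 100 2101 (73049, 342) = (109573, 515) := by decide
set_option maxRecDepth 8000 in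
lemma cyc100d : cLoop 100 2201 (109573, 515) = (146097, 687) := by decide

lemma cyc400 : cLoop 400 1901 (0, 0) = (146097, 687) := by
  have h1 := cLoop_add 100 300 1901 ((0 : Int), (0 : Int))
  have h2 := cLoop_add 100 200 2001 ((36525 : Int), (170 : Int))
  have h3 := cLoop_add 100 100 2101 ((73049 : Int), (342 : Int))
  norm_num [cyc100a, cyc100b, cyc100c] at h1 h2 h3
  show cLoop (100 + 300) 1901 (0, 0) = _
  rw [h1, h2, h3]
  exact cyc100d

lemma Dcyc_mod : Dcyc % 7 = 0 := by rw [Dcyc, cyc400]; decide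

lemma cLoop_cycle (q : Nat) : cLoop (400 * q) 1901 (0, 0) = (Dcyc * q, Ccyc * q) := by
  induction q with
  | zero => simp [cLoop]
  | succ t ih =>
    have e : 400 * (t + 1) = 400 * t + 400 := by ring
    rw [e, cLoop_add (400 * t) 400 1901 (0, 0), ih]
    obtain ⟨k0, hk0⟩ : ∃ k, Dcyc = 7 * k := ⟨Dcyc / 7, by have := Dcyc_mod; omega⟩
    have e1 : (1901 : Int) + (400 * t : Nat) = 1901 + 400 * (t : Int) := by push_cast; ring
    have e2 : Dcyc * (t : Int) = 0 + 7 * (k0 * t) := by rw [hk0]; ring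
    rw [e1, e2, cLoop_shift 400 1901 0 (Ccyc * t) t (k0 * t),
        cLoop_acc 400 1901 0 (Ccyc * t)]
    show (Dcyc + 7 * (k0 * (t:Int)), Ccyc * (t:Int) + Ccyc) = _
    rw [hk0]
    push_cast
    simp only [Prod.mk.injEq]
    constructor <;> ring

lemma cLoop_main (q r : Nat) :
    (cLoop (400 * q + r) 1901 (0, 1)).2 = 1 + Ccyc * q + (cLoop r 1901 (0, 0)).2 := by
  rw [cLoop_acc _ 1901 0 1, cLoop_add (400 * q) r 1901 (0, 0), cLoop_cycle]
  obtain ⟨k0, hk0⟩ : ∃ k, Dcyc = 7 * k := ⟨Dcyc / 7, by have := Dcyc_mod; omega⟩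
  have e1 : (1901 : Int) + (400 * q : Nat) = 1901 + 400 * (q : Int) := by push_cast; ring
  have e2 : Dcyc * (q : Int) = 0 + 7 * (k0 * q) := by rw [hk0]; ring
  rw [e1, e2, cLoop_shift r 1901 0 (Ccyc * q) q (k0 * q),
      cLoop_acc r 1901 0 (Ccyc * q)]
  show 1 + (Ccyc * ↑q + (cLoop r 1901 (0, 0)).2) = _
  ring

-- B's table, characterised
def clist : Nat → List Int
  | 0 => []
  | k + 1 => clist k ++ [(Y (1901 + (k : Int)) ((cLoop k 1901 (0, 0)).1, 0)).2]

lemma table_eq (k : Nat) :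
    (List.range k).foldl bYearStep (0, []) = ((cLoop k 1901 (0, 0)).1, clist k) := by
  induction k with
  | zero => rfl
  | succ t ih =>
    rw [List.range_succ, List.foldl_append, ih]
    show bYearStep _ t = _
    simp only [bYearStep, clist, Prod.mk.injEq]
    refine ⟨?_, rfl⟩
    show (Y (1901 + (t : Int)) ((cLoop t 1901 (0, 0)).1, 0)).1 = (cLoop (t + 1) 1901 (0, 0)).1
    rw [cLoop_succ_back t 1901 (0, 0)]
    conv_rhs => rw [show cLoop t 1901 (0, 0) = ((cLoop t 1901 (0, 0)).1, (cLoop t 1901 (0, 0)).2) from rfl,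
                    Y_acc]

lemma clist_length (k : Nat) : (clist k).length = k := by
  induction k with
  | zero => rfl
  | succ t ih => simp [clist, ih]

lemma clist_sum (r : Nat) : (clist r).sum = (cLoop r 1901 (0, 0)).2 := by
  induction r with
  | zero => rfl
  | succ t ih =>
    rw [clist, List.sum_append, ih, cLoop_succ_back t 1901 (0, 0)]
    conv_rhs => rw [show cLoop t 1901 (0, 0) = ((cLoop t 1901 (0, 0)).1, (cLoop t 1901 (0, 0)).2) from rfl,
                    Y_acc]
    simp

lemma clist_take (r k : Nat) (h : r ≤ k) : (clist k).take r = clist r := by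
  induction k with
  | zero =>
    have hr : r = 0 := by omega
    subst hr; rfl
  | succ t ih =>
    rcases Nat.lt_or_ge r (t + 1) with hlt | hge
    · rw [clist, List.take_append_of_le_length (by rw [clist_length]; omega)]
      exact ih (by omega)
    · have : r = t + 1 := by omega
      subst this
      rw [List.take_of_length_le (by rw [clist_length])]

lemma bCounts_eq : bCounts = clist 400 := by
  unfold bCounts
  rw [table_eq]

-- ===== VERDICT (by name: the statement is the Claim_ definition above) =====
theorem domingos_spec : Claim_equal_domingos := by
  intro hasta _
  unfold Spec_domingos domingos domingos_alt
  by_cases h : hasta - 1900 ≤ 0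
  · have ht : (hasta - 1900).toNat = 0 := by omega
    simp [h, ht, aLoop]
  · simp only [if_neg (by omega : ¬ hasta - 1900 ≤ 0)]
    set n : Int := hasta - 1900 with hn
    have hfd : PySem.Int.floordiv n 400 = n / 400 := PySem.Int.floordiv_eq_ediv_of_pos (by omega)
    have hmd : PySem.Int.mod n 400 = n % 400 := PySem.Int.mod_eq_emod_of_pos (by omega)
    have hq0 : 0 ≤ n / 400 := by omega
    have hr0 : 0 ≤ n % 400 := by omega
    have hr400 : n % 400 < 400 := by omega
    have hsplit : n = 400 * (n / 400) + n % 400 := by omega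
    have htn : n.toNat = 400 * (n / 400).toNat + (n % 400).toNat := by omega
    rw [aLoop_eq_cLoop, htn, cLoop_main, hfd, hmd, bCounts_eq, clist_sum 400,
        PySem.List.slice_to _ hr0, clist_take _ 400 (by omega), clist_sum]
    have : ((n / 400).toNat : Int) = n / 400 := by omega
    rw [this, show (cLoop 400 1901 (0, 0)).2 = Ccyc from rfl]
    ring
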